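-- pv_equiv track=rewrite | github.com/PelicanQ/masters-thesis | exact/four/hamil.py | make_excitation_idx_map
-- ===== SOURCE A (Python) =====
-- import itertools
--
-- def make_excitation_idx_map(statesperbit: int, max_excitation: int):
--     idx_dict = {}
--     i = 0
--     # the order we use is the one after filtering itertools.product output
--     for comb in itertools.product(range(statesperbit), repeat=4):
--         if sum(comb) <= max_excitation:
--             idx_dict[comb] = i
--             i += 1
--     return idx_dict
-- ===== SOURCE B (Python) =====
-- def make_excitation_idx_map(statesperbit: int, max_excitation: int):
--     # Generate only the valid 4-tuples, in lexicographic order, by pruning each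
--     # nested loop with the remaining excitation budget, numbering them as we go.
--     out = {}
--     i = 0
--     for a in range(min(statesperbit, max_excitation + 1)):
--         r1 = max_excitation - a
--         for b in range(min(statesperbit, r1 + 1)):
--             r2 = r1 - b
--             for c in range(min(statesperbit, r2 + 1)):
--                 r3 = r2 - c
--                 for d in range(min(statesperbit, r3 + 1)):
--                     out[(a, b, c, d)] = i
--                     i += 1
--     return out
-- ===== Notes on version B (the rewrite author's own statement) =====
-- stated objective: faster
-- what changed: Instead of scanning all statesperbit^4 tuples and filtering by sum, B generates only the valid tuples with nested loops bounded by the remaining excitation budget (lexicographic order is preserved), then numbers them with enumerate.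
import Mathlib
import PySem

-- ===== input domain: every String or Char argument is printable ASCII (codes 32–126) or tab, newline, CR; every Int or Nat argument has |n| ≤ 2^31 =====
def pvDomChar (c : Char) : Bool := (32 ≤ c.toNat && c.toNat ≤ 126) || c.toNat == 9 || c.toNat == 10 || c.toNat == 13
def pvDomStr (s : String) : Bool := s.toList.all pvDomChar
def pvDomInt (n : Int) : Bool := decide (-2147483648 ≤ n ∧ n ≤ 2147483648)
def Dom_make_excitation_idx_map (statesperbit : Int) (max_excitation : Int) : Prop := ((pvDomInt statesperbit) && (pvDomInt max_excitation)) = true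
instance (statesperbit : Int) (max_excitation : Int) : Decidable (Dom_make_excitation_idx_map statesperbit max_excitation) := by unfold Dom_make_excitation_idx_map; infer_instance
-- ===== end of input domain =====

-- B replaces A's scan of all statesperbit^4 tuples by nested loops pruned with the
-- remaining excitation budget, generating only the valid tuples (objective: faster).


-- ===== PORT A =====
-- itertools.product(range(n), repeat=4), in the order itertools.product yields it
def pvProd4 (n : Int) : List (List Int) :=
  (PySem.List.pyRange 0 n 1).flatMap (fun a =>
    (PySem.List.pyRange 0 n 1).flatMap (fun b =>
      (PySem.List.pyRange 0 n 1).flatMap (fun c =>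
        (PySem.List.pyRange 0 n 1).map (fun d => [a, b, c, d]))))

def make_excitation_idx_map (statesperbit : Int) (max_excitation : Int) : List (List Int × Int) :=
  ((pvProd4 statesperbit).foldl
    (fun st comb =>
      if comb.sum ≤ max_excitation then (st.1.insert comb st.2, st.2 + 1) else st)
    ((PySem.Dict.empty : PySem.Dict (List Int) Int), 0)).1.items

-- ===== PORT B =====
-- the pruned nested insert loops of Source B
def make_excitation_idx_map_alt (statesperbit : Int) (max_excitation : Int) : List (List Int × Int) :=
  ((PySem.List.pyRange 0 (min statesperbit (max_excitation + 1)) 1).foldl (fun st a =>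
    (PySem.List.pyRange 0 (min statesperbit (max_excitation - a + 1)) 1).foldl (fun st b =>
      (PySem.List.pyRange 0 (min statesperbit (max_excitation - a - b + 1)) 1).foldl (fun st c =>
        (PySem.List.pyRange 0 (min statesperbit (max_excitation - a - b - c + 1)) 1).foldl (fun st d =>
          (st.1.insert [a, b, c, d] st.2, st.2 + 1)) st) st) st)
    ((PySem.Dict.empty : PySem.Dict (List Int) Int), 0)).1.items

-- ===== PRECONDITION & SPEC =====
def Spec_make_excitation_idx_map (statesperbit : Int) (max_excitation : Int) (out : List (List Int × Int)) : Prop := out = make_excitation_idx_map_alt statesperbit max_excitation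
instance (statesperbit : Int) (max_excitation : Int) (out : List (List Int × Int)) : Decidable (Spec_make_excitation_idx_map statesperbit max_excitation out) := by unfold Spec_make_excitation_idx_map; infer_instance

-- ===== CLAIM (what is proved, stated in full; the proofs are below) =====
def Claim_equal_make_excitation_idx_map : Prop := ∀ (statesperbit : Int) (max_excitation : Int), Dom_make_excitation_idx_map statesperbit max_excitation → Spec_make_excitation_idx_map statesperbit max_excitation (make_excitation_idx_map statesperbit max_excitation)

-- ===== LEMMAS AND PROOFS =====

-- the list of tuples B's loops generate, in order (proof-side helper)
def pvTuplesB (n m : Int) : List (List Int) :=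
  (PySem.List.pyRange 0 (min n (m + 1)) 1).flatMap (fun a =>
    (PySem.List.pyRange 0 (min n (m - a + 1)) 1).flatMap (fun b =>
      (PySem.List.pyRange 0 (min n (m - a - b + 1)) 1).flatMap (fun c =>
        (PySem.List.pyRange 0 (min n (m - a - b - c + 1)) 1).map (fun d => [a, b, c, d]))))



-- filtering an increasing range 0..k-1 by x ≤ t truncates it (Nat bound)
theorem pvRangeFilterNat (k : Nat) (t : Int) :
    (PySem.List.pyRange 0 (k : Int) 1).filter (fun x => decide (x ≤ t))
      = PySem.List.pyRange 0 (min (k : Int) (t + 1)) 1 := by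
  induction k with
  | zero =>
    rw [PySem.List.pyRange_one_eq_nil (by norm_num),
      PySem.List.pyRange_one_eq_nil (by simp)]
    rfl
  | succ k ih =>
    rw [show ((k + 1 : Nat) : Int) = (k : Int) + 1 by push_cast; ring,
      PySem.List.pyRange_one_succ_right (by positivity), List.filter_append, ih]
    by_cases hkt : (k : Int) ≤ t
    · rw [show min ((k : Int) + 1) (t + 1) = (k : Int) + 1 by omega,
        show min ((k : Int)) (t + 1) = (k : Int) by omega,
        PySem.List.pyRange_one_succ_right (by positivity)]
      simp [hkt]
    · rw [show min ((k : Int) + 1) (t + 1) = min (k : Int) (t + 1) by omega]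
      simp; omega

-- the same for an Int bound
theorem pvRangeFilter (n t : Int) :
    (PySem.List.pyRange 0 n 1).filter (fun x => decide (x ≤ t))
      = PySem.List.pyRange 0 (min n (t + 1)) 1 := by
  by_cases h : n ≤ 0
  · rw [PySem.List.pyRange_one_eq_nil h, PySem.List.pyRange_one_eq_nil (by omega)]
    rfl
  · have : n = ((n.toNat : Nat) : Int) := by omega
    rw [this]
    exact pvRangeFilterNat n.toNat t

-- a flatMap over 0..n-1 whose body dies above u can stop at min n u
theorem pvFlatMapPrune {α : Type} (n u : Int) (f : Int → List α)
    (hf : ∀ x, u ≤ x → f x = []) :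
    (PySem.List.pyRange 0 n 1).flatMap f
      = (PySem.List.pyRange 0 (min n u) 1).flatMap f := by
  by_cases h : n ≤ 0
  · rw [PySem.List.pyRange_one_eq_nil h, PySem.List.pyRange_one_eq_nil (by omega)]
  · by_cases hu : u ≤ 0
    · have h1 : PySem.List.pyRange 0 (min n u) 1 = [] :=
        PySem.List.pyRange_one_eq_nil (le_trans (min_le_right n u) hu)
      rw [h1, List.flatMap_nil]
      apply List.flatMap_eq_nil_iff.mpr
      intro x hx
      exact hf x (le_trans hu ((PySem.List.mem_pyRange_one.mp hx).1))
    · by_cases hun : u ≤ n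
      · rw [show min n u = u from min_eq_right hun]
        rw [PySem.List.pyRange_one_append 0 u n (by omega) hun, List.flatMap_append]
        have : (PySem.List.pyRange u n 1).flatMap f = [] := by
          apply List.flatMap_eq_nil_iff.mpr
          intro x hx
          exact hf x ((PySem.List.mem_pyRange_one.mp hx).1)
        rw [this, List.append_nil]
      · rw [show min n u = n from min_eq_left (by omega)]

-- B's pruned generator produces exactly A's filtered product, in the same order
theorem pvTuplesB_eq_filter (n m : Int) :
    pvTuplesB n m = (pvProd4 n).filter (fun c => decide (c.sum ≤ m)) := by
  unfold pvTuplesB pvProd4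
  rw [List.filter_flatMap]
  have hd : ∀ a b c : Int,
      ((PySem.List.pyRange 0 n 1).map (fun d => [a, b, c, d])).filter
          (fun l => decide (l.sum ≤ m))
        = (PySem.List.pyRange 0 (min n (m - a - b - c + 1)) 1).map (fun d => [a, b, c, d]) := by
    intro a b c
    rw [List.filter_map]
    have : (PySem.List.pyRange 0 n 1).filter
        ((fun l => decide (l.sum ≤ m)) ∘ (fun d => [a, b, c, d]))
        = (PySem.List.pyRange 0 n 1).filter (fun d => decide (d ≤ m - a - b - c)) := by
      apply List.filter_congr
      intro d _
      simp only [Function.comp, List.sum_cons, List.sum_nil, add_zero, decide_eq_decide]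
      omega
    rw [this, pvRangeFilter]
  have hc : ∀ a b : Int,
      ((PySem.List.pyRange 0 n 1).flatMap (fun c =>
          ((PySem.List.pyRange 0 n 1).map (fun d => [a, b, c, d])).filter
            (fun l => decide (l.sum ≤ m))))
        = (PySem.List.pyRange 0 (min n (m - a - b + 1)) 1).flatMap (fun c =>
            (PySem.List.pyRange 0 (min n (m - a - b - c + 1)) 1).map (fun d => [a, b, c, d])) := by
    intro a b
    simp only [hd]
    apply pvFlatMapPrune
    intro c hcge
    rw [PySem.List.pyRange_one_eq_nil (by omega)]
    rfl
  have hb : ∀ a : Int,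
      ((PySem.List.pyRange 0 n 1).flatMap (fun b =>
          (PySem.List.pyRange 0 n 1).flatMap (fun c =>
            ((PySem.List.pyRange 0 n 1).map (fun d => [a, b, c, d])).filter
              (fun l => decide (l.sum ≤ m)))))
        = (PySem.List.pyRange 0 (min n (m - a + 1)) 1).flatMap (fun b =>
            (PySem.List.pyRange 0 (min n (m - a - b + 1)) 1).flatMap (fun c =>
              (PySem.List.pyRange 0 (min n (m - a - b - c + 1)) 1).map (fun d => [a, b, c, d]))) := by
    intro a
    simp only [hc]
    apply pvFlatMapPrune
    intro b hbge
    rw [PySem.List.pyRange_one_eq_nil (by omega)]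
    rfl
  simp only [List.filter_flatMap, hb]
  refine (pvFlatMapPrune n (m + 1) _ ?_).symm
  intro a hage
  rw [PySem.List.pyRange_one_eq_nil (by omega)]
  rfl

-- the product list has no duplicate tuples
theorem pvProd4_nodup (n : Int) : (pvProd4 n).Nodup := by
  unfold pvProd4
  have hr := PySem.List.nodup_pyRange_one (a := 0) (b := n)
  rw [List.nodup_flatMap]
  constructor
  · intro a _
    rw [List.nodup_flatMap]
    constructor
    · intro b _
      rw [List.nodup_flatMap]
      constructor
      · intro c _
        exact (List.nodup_map_iff (by intro x y hxy; simpa using hxy)).mpr hr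
      · refine List.Pairwise.imp ?_ hr
        intro c c' hne
        simp only [Function.onFun, List.disjoint_left]
        intro l hl hl'
        simp only [List.mem_map] at hl hl'
        obtain ⟨d, _, rfl⟩ := hl
        obtain ⟨d', _, h⟩ := hl'
        simp only [List.cons.injEq, and_true] at h
        exact hne h.2.2.1.symm
    · refine List.Pairwise.imp ?_ hr
      intro b b' hne
      simp only [Function.onFun, List.disjoint_left]
      intro l hl hl'
      simp only [List.mem_flatMap, List.mem_map] at hl hl'
      obtain ⟨c, _, d, _, rfl⟩ := hl
      obtain ⟨c', _, d', _, h⟩ := hl'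
      simp only [List.cons.injEq, and_true] at h
      exact hne h.2.1.symm
  · refine List.Pairwise.imp ?_ hr
    intro a a' hne
    simp only [Function.onFun, List.disjoint_left]
    intro l hl hl'
    simp only [List.mem_flatMap, List.mem_map] at hl hl'
    obtain ⟨b, _, c, _, d, _, rfl⟩ := hl
    obtain ⟨b', _, c', _, d', _, h⟩ := hl'
    simp only [List.cons.injEq, and_true] at h
    exact hne h.1.symm

-- A's filter/insert/count loop, characterised: it appends the enumerated filtered list
theorem pvFoldA (m : Int) (L : List (List Int)) :
    ∀ (d : PySem.Dict (List Int) Int) (i : Int), L.Nodup →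
    (∀ x ∈ L, d.contains x = false) →
    (L.foldl (fun st comb =>
        if comb.sum ≤ m then (st.1.insert comb st.2, st.2 + 1) else st)
      (d, i)).1.items
      = d.items ++
        (PySem.List.enumerate (L.filter (fun c => decide (c.sum ≤ m))) i).map
          (fun p => (p.2, p.1)) := by
  induction L with
  | nil => intro d i _ _; simp [PySem.List.enumerate_nil]
  | cons x L ih =>
    intro d i hnd hfresh
    have hx : d.contains x = false := hfresh x (List.mem_cons_self ..)
    rw [List.foldl_cons]
    by_cases hs : x.sum ≤ m
    · simp only [hs, if_pos]
      rw [ih (d.insert x i) (i + 1) hnd.of_cons ?_]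
      · rw [PySem.Dict.items_insert_of_not_contains d i hx]
        simp only [List.filter_cons, hs, decide_true, if_true, PySem.List.enumerate_cons,
          List.map_cons, List.append_assoc, List.cons_append, List.nil_append]
      · intro y hy
        rw [PySem.Dict.contains_insert]
        have hne : y ≠ x := by
          rintro rfl
          exact (List.nodup_cons.mp hnd).1 hy
        simp [hfresh y (List.mem_cons_of_mem _ hy), hne]
    · simp only [hs, if_neg, not_false_iff]
      rw [ih d i hnd.of_cons (fun y hy => hfresh y (List.mem_cons_of_mem _ hy))]
      simp [hs]


-- B's nested loops are the fold of the insert/count step over its tuple list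
theorem pvAltFold (n m : Int) :
    make_excitation_idx_map_alt n m
      = ((pvTuplesB n m).foldl (fun st t => (st.1.insert t st.2, st.2 + 1))
          ((PySem.Dict.empty : PySem.Dict (List Int) Int), 0)).1.items := by
  unfold make_excitation_idx_map_alt pvTuplesB
  simp only [List.foldl_flatMap, List.foldl_map]

-- the insert/count fold over distinct fresh keys appends the enumerated list
theorem pvFoldB (L : List (List Int)) :
    ∀ (d : PySem.Dict (List Int) Int) (i : Int), L.Nodup →
    (∀ x ∈ L, d.contains x = false) →
    (L.foldl (fun st t => (st.1.insert t st.2, st.2 + 1)) (d, i)).1.items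
      = d.items ++ (PySem.List.enumerate L i).map (fun p => (p.2, p.1)) := by
  induction L with
  | nil => intro d i _ _; simp [PySem.List.enumerate_nil]
  | cons x L ih =>
    intro d i hnd hfresh
    have hx : d.contains x = false := hfresh x (List.mem_cons_self ..)
    rw [List.foldl_cons, ih (d.insert x i) (i + 1) hnd.of_cons ?_]
    · rw [PySem.Dict.items_insert_of_not_contains d i hx]
      simp only [PySem.List.enumerate_cons, List.map_cons, List.append_assoc,
        List.cons_append, List.nil_append]
    · intro y hy
      rw [PySem.Dict.contains_insert]
      have hne : y ≠ x := by
        rintro rfl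
        exact (List.nodup_cons.mp hnd).1 hy
      simp [hfresh y (List.mem_cons_of_mem _ hy), hne]

-- ===== VERDICT (by name: the statement is the Claim_ definition above) =====
theorem make_excitation_idx_map_spec : Claim_equal_make_excitation_idx_map := by
  intro n m _
  unfold Spec_make_excitation_idx_map make_excitation_idx_map
  rw [pvFoldA m (pvProd4 n) PySem.Dict.empty 0 (pvProd4_nodup n)
      (fun x _ => PySem.Dict.contains_empty x)]
  rw [pvAltFold, pvFoldB (pvTuplesB n m) PySem.Dict.empty 0
      (by rw [pvTuplesB_eq_filter]; exact (pvProd4_nodup n).filter _)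
      (fun x _ => PySem.Dict.contains_empty x)]
  rw [pvTuplesB_eq_filter]
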